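-- pv_equiv track=rewrite | github.com/KiemLab-RIS/Makassar_project | baseErrorRate.py | classifyIndel
-- ===== SOURCE A (Python) =====
-- def classifyIndel(inputRanges):
--   src = inputRanges[0]
--   dst = inputRanges[1]
--   lSrc = 0
--   lDst = 0
--   for x1,x2 in src:
--      lSrc = x2
--
--   for x1,x2 in dst:
--     lDst = x2
--
--   #
--   # dst > src = (+) deletion
--   # src > dst = (-) insertion
--   #
--   return(lDst - lSrc)
-- ===== SOURCE B (Python) =====
-- def classifyIndel(inputRanges):
--     src = inputRanges[0]
--     dst = inputRanges[1]
--     lSrc = src[-1][1] if src else 0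
--     lDst = dst[-1][1] if dst else 0
--     return lDst - lSrc
-- ===== Notes on version B (the rewrite author's own statement) =====
-- stated objective: simpler
-- what changed: Both O(n) loops (which only retain the last pair's second coordinate) are replaced by direct tail indexing src[-1][1] / dst[-1][1] with 0 for empty lists.
import Mathlib
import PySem

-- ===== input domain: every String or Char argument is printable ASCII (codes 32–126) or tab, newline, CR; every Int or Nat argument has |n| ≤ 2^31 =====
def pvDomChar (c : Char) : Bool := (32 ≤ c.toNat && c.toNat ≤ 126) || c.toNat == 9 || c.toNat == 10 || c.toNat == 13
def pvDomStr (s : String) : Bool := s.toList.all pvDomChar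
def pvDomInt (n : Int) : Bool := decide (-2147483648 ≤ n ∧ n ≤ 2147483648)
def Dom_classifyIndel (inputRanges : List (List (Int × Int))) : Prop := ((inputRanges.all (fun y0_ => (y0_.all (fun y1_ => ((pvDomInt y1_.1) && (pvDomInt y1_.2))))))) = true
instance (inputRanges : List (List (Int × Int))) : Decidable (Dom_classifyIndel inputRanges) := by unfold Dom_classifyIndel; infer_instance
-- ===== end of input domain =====

-- B replaces the two scans (which only keep the last pair's second coordinate) by
-- direct tail indexing; equivalence holds on lists with at least two range lists.

-- ===== PORT A =====
def classifyIndel (inputRanges : List (List (Int × Int))) : Int :=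
  match PySem.List.pyGet? inputRanges 0, PySem.List.pyGet? inputRanges 1 with
  | some src, some dst =>
      -- for x1,x2 in src: lSrc = x2   (fold keeping the current x2)
      let lSrc : Int := src.foldl (fun _ p => p.2) 0
      let lDst : Int := dst.foldl (fun _ p => p.2) 0
      lDst - lSrc
  | _, _ => 0   -- IndexError; excluded by Pre_

-- ===== PORT B =====
-- src[-1][1] if src else 0
def pvLastSnd (l : List (Int × Int)) : Int := l.getLast?.elim 0 Prod.snd

def classifyIndel_alt (inputRanges : List (List (Int × Int))) : Int :=
  match PySem.List.pyGet? inputRanges 0 with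
  | none => 0   -- IndexError; excluded by Pre_
  | some src =>
    match PySem.List.pyGet? inputRanges 1 with
    | none => 0   -- IndexError; excluded by Pre_
    | some dst => pvLastSnd dst - pvLastSnd src

-- ===== PRECONDITION & SPEC =====
-- Pre_ excludes exactly the inputs where A raises IndexError (fewer than two range lists).
def Pre_classifyIndel (inputRanges : List (List (Int × Int))) : Prop := 2 ≤ inputRanges.length
instance (inputRanges : List (List (Int × Int))) : Decidable (Pre_classifyIndel inputRanges) := by unfold Pre_classifyIndel; infer_instance
def pvWitness_classifyIndel : (List (List (Int × Int))) := [[(1,2)],[(3,4),(5,6)]]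

def Spec_classifyIndel (inputRanges : List (List (Int × Int))) (out : Int) : Prop := out = classifyIndel_alt inputRanges
instance (inputRanges : List (List (Int × Int))) (out : Int) : Decidable (Spec_classifyIndel inputRanges out) := by unfold Spec_classifyIndel; infer_instance

-- ===== CLAIM (what is proved, stated in full; the proofs are below) =====
def Claim_equal_classifyIndel : Prop := ∀ (inputRanges : List (List (Int × Int))), Dom_classifyIndel inputRanges → Pre_classifyIndel inputRanges → Spec_classifyIndel inputRanges (classifyIndel inputRanges)

-- ===== LEMMAS AND PROOFS =====
-- A's loop keeps only the last second coordinate: the fold equals the last element's snd.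
theorem foldl_snd_eq_getLast (l : List (Int × Int)) (a : Int) :
    l.foldl (fun _ p => p.2) a = l.getLast?.elim a Prod.snd := by
  induction l generalizing a with
  | nil => rfl
  | cons x xs ih =>
      simp [List.foldl, ih, List.getLast?_cons]
      cases xs.getLast? <;> simp

-- ===== VERDICT (by name: the statement is the Claim_ definition above) =====
theorem classifyIndel_spec : Claim_equal_classifyIndel := by
  intro inputRanges _ _
  unfold Spec_classifyIndel classifyIndel classifyIndel_alt
  cases h0 : PySem.List.pyGet? inputRanges 0 <;>
    cases h1 : PySem.List.pyGet? inputRanges 1 <;>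
      simp [foldl_snd_eq_getLast, pvLastSnd]
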